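-- pv_equiv track=rewrite | github.com/pratnik/fo_trading_system | app/strategies/hedged_strangle.py | validate_hedged_strangle_structure
-- ===== SOURCE A (Python) =====
-- from typing import Dict, List, Any
--
-- def validate_hedged_strangle_structure(orders: List[Dict[str, Any]]) -> bool:
--     """Validate that orders represent proper Hedged Strangle structure"""
--     if len(orders) != 4:
--         return False
--
--     # Should have 2 calls and 2 puts
--     calls = [o for o in orders if o.get("option_type") == "CE"]
--     puts = [o for o in orders if o.get("option_type") == "PE"]
--
--     if len(calls) != 2 or len(puts) != 2:
--         return False
--
--     # Should have one short and one long for each type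
--     call_sides = [o.get("side") for o in calls]
--     put_sides = [o.get("side") for o in puts]
--
--     return ("BUY" in call_sides and "SELL" in call_sides and
--             "BUY" in put_sides and "SELL" in put_sides)
-- ===== SOURCE B (Python) =====
-- def validate_hedged_strangle_structure(orders):
--     """Validate that orders represent proper Hedged Strangle structure"""
--     if len(orders) != 4:
--         return False
--     return {(o.get("option_type"), o.get("side")) for o in orders} == {
--         ("CE", "BUY"), ("CE", "SELL"), ("PE", "BUY"), ("PE", "SELL")}
-- ===== Notes on version B (the rewrite author's own statement) =====
-- stated objective: simpler
-- what changed: Replaces the filter-into-calls/puts lists, the two count checks and the four membership tests by building a set of (option_type, side) tuples in one pass and comparing it to the literal target set.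
import Mathlib
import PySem

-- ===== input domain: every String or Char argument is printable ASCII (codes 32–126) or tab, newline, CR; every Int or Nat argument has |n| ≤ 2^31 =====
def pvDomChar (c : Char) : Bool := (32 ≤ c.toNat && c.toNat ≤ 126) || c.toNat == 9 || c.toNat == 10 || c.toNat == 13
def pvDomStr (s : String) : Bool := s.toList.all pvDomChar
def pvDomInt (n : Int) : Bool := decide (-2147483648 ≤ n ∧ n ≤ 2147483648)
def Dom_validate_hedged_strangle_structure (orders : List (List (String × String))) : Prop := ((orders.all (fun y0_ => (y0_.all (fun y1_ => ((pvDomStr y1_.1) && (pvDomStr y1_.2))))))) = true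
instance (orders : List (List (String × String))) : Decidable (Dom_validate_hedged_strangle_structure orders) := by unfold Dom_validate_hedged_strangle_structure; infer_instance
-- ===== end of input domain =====

-- B replaces A's filter/count/membership control flow with one pass building the set of
-- (option_type, side) pairs compared against the literal target set (objective: simpler).


-- shared representation helper: o.get(k) on the association-list encoding of a dict (first match)
def pvGet (o : List (String × String)) (k : String) : Option String :=
  (o.find? (fun p => p.1 == k)).map (fun p => p.2)

-- ===== PORT A =====
-- literal transliteration of A: filter calls/puts, count checks, four membership tests
def validate_hedged_strangle_structure (orders : List (List (String × String))) : Bool :=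
  if orders.length ≠ 4 then false
  else
    let calls := orders.filter (fun o => pvGet o "option_type" == some "CE")
    let puts  := orders.filter (fun o => pvGet o "option_type" == some "PE")
    if calls.length ≠ 2 ∨ puts.length ≠ 2 then false
    else
      let call_sides := calls.map (fun o => pvGet o "side")
      let put_sides  := puts.map (fun o => pvGet o "side")
      call_sides.contains (some "BUY") && call_sides.contains (some "SELL") &&
      put_sides.contains (some "BUY") && put_sides.contains (some "SELL")

-- ===== PORT B =====
-- the set comprehension {(o.get("option_type"), o.get("side")) for o in orders}
def pvStranglePairs (orders : List (List (String × String))) : List (Option String × Option String) :=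
  orders.map (fun o => (pvGet o "option_type", pvGet o "side"))

-- the literal target set {("CE","BUY"), ("CE","SELL"), ("PE","BUY"), ("PE","SELL")}
def pvStrangleTarget : PySem.Set (Option String × Option String) :=
  PySem.Set.ofList
    [(some "CE", some "BUY"), (some "CE", some "SELL"),
     (some "PE", some "BUY"), (some "PE", some "SELL")]

-- B: one pass building the pair set, then a single set-equality comparison
def validate_hedged_strangle_structure_alt (orders : List (List (String × String))) : Bool :=
  if orders.length ≠ 4 then false
  else PySem.Set.equal (PySem.Set.ofList (pvStranglePairs orders)) pvStrangleTarget

-- ===== PRECONDITION & SPEC =====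
def Spec_validate_hedged_strangle_structure (orders : List (List (String × String))) (out : Bool) : Prop := out = validate_hedged_strangle_structure_alt orders
instance (orders : List (List (String × String))) (out : Bool) : Decidable (Spec_validate_hedged_strangle_structure orders out) := by unfold Spec_validate_hedged_strangle_structure; infer_instance

-- ===== CLAIM (what is proved, stated in full; the proofs are below) =====
def Claim_equal_validate_hedged_strangle_structure : Prop := ∀ (orders : List (List (String × String))), Dom_validate_hedged_strangle_structure orders → Spec_validate_hedged_strangle_structure orders (validate_hedged_strangle_structure orders)

-- ===== LEMMAS AND PROOFS =====

-- the target list written out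
def pvT : List (Option String × Option String) :=
  [(some "CE", some "BUY"), (some "CE", some "SELL"),
   (some "PE", some "BUY"), (some "PE", some "SELL")]

-- Core combinatorial fact: a 4-element list containing all four target pairs
-- is a permutation of the target list.
theorem pv_key (m : List (Option String × Option String)) (h4 : m.length = 4)
    (h1 : (some "CE", some "BUY") ∈ m) (h2 : (some "CE", some "SELL") ∈ m)
    (h3 : (some "PE", some "BUY") ∈ m) (h5 : (some "PE", some "SELL") ∈ m) :
    m.Perm pvT := by
  have hsub : pvT ⊆ m := by
    intro x hx
    simp only [pvT, List.mem_cons, List.not_mem_nil, or_false] at hx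
    rcases hx with rfl | rfl | rfl | rfl <;> assumption
  have hnd : pvT.Nodup := by decide
  have hsp : pvT.Subperm m := hnd.subperm hsub
  have hlen : m.length ≤ pvT.length := by simp [pvT, h4]
  exact (hsp.perm_of_length_le hlen).symm

-- membership in the mapped pair list, spelled out
theorem pv_mem_pairs (orders : List (List (String × String))) (t s : String) :
    ((some t, some s) ∈ pvStranglePairs orders) ↔
    ∃ o ∈ orders, pvGet o "option_type" = some t ∧ pvGet o "side" = some s := by
  simp [pvStranglePairs, List.mem_map, Prod.ext_iff]

-- the filtered-and-mapped membership test of A, rephrased as pair membership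
theorem pv_contains_iff (orders : List (List (String × String))) (t s : String) :
    (((orders.filter (fun o => pvGet o "option_type" == some t)).map
        (fun o => pvGet o "side")).contains (some s) = true) ↔
    (some t, some s) ∈ pvStranglePairs orders := by
  rw [pv_mem_pairs]
  simp only [List.mem_map, List.mem_filter, List.contains_iff_exists_mem_beq, beq_iff_eq]
  constructor
  · rintro ⟨v, ⟨o, ⟨ho, h1⟩, h2⟩, hv⟩; exact ⟨o, ho, h1, h2.trans hv.symm⟩
  · rintro ⟨o, ho, h1, h2⟩; exact ⟨some s, ⟨o, ⟨ho, h1⟩, h2⟩, rfl⟩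

-- A's filter length, rephrased as a count over the pair list
theorem pv_count (orders : List (List (String × String))) (t : String) :
    (orders.filter (fun o => pvGet o "option_type" == some t)).length =
    (pvStranglePairs orders).countP (fun x => x.1 == some t) := by
  simp [pvStranglePairs, List.countP_map, Function.comp_def, ← List.countP_eq_length_filter]

-- B's set equality, rephrased as same-members with the target list
theorem pv_equal_iff (m : List (Option String × Option String)) :
    ((PySem.Set.ofList m).equal pvStrangleTarget = true) ↔ (∀ x, x ∈ m ↔ x ∈ pvT) := by
  rw [PySem.Set.equal_iff]
  constructor <;> intro h x <;>
    simpa [PySem.Set.mem_ofList, pvStrangleTarget, pvT] using h x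

theorem pv_main (orders : List (List (String × String))) :
    validate_hedged_strangle_structure orders = validate_hedged_strangle_structure_alt orders := by
  unfold validate_hedged_strangle_structure validate_hedged_strangle_structure_alt
  by_cases hlen : orders.length = 4
  · simp only [hlen, ne_eq, not_true_eq_false, if_false]
    have hm4 : (pvStranglePairs orders).length = 4 := by
      simp [pvStranglePairs, hlen]
    rw [Bool.eq_iff_iff, pv_equal_iff]
    constructor
    · intro hA
      by_cases hc : ¬(orders.filter (fun o => pvGet o "option_type" == some "CE")).length = 2 ∨
          ¬(orders.filter (fun o => pvGet o "option_type" == some "PE")).length = 2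
      · rw [if_pos hc] at hA; exact absurd hA (by simp)
      · rw [if_neg hc] at hA
        simp only [Bool.and_eq_true] at hA
        obtain ⟨⟨⟨hcb, hcs⟩, hpb⟩, hps⟩ := hA
        have perm := pv_key (pvStranglePairs orders) hm4
          ((pv_contains_iff orders "CE" "BUY").mp hcb)
          ((pv_contains_iff orders "CE" "SELL").mp hcs)
          ((pv_contains_iff orders "PE" "BUY").mp hpb)
          ((pv_contains_iff orders "PE" "SELL").mp hps)
        exact fun x => perm.mem_iff
    · intro hB
      have hmem : ∀ x ∈ pvT, x ∈ pvStranglePairs orders := fun x hx => (hB x).mpr hx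
      have perm := pv_key (pvStranglePairs orders) hm4
        (hmem _ (by decide)) (hmem _ (by decide)) (hmem _ (by decide)) (hmem _ (by decide))
      have hcCE : (orders.filter (fun o => pvGet o "option_type" == some "CE")).length = 2 := by
        rw [pv_count, perm.countP_eq]; decide
      have hcPE : (orders.filter (fun o => pvGet o "option_type" == some "PE")).length = 2 := by
        rw [pv_count, perm.countP_eq]; decide
      rw [if_neg (by simp [hcCE, hcPE])]
      simp only [Bool.and_eq_true]
      exact ⟨⟨⟨(pv_contains_iff orders "CE" "BUY").mpr (hmem _ (by decide)),
        (pv_contains_iff orders "CE" "SELL").mpr (hmem _ (by decide))⟩,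
        (pv_contains_iff orders "PE" "BUY").mpr (hmem _ (by decide))⟩,
        (pv_contains_iff orders "PE" "SELL").mpr (hmem _ (by decide))⟩
  · simp [hlen]

-- ===== VERDICT (by name: the statement is the Claim_ definition above) =====
theorem validate_hedged_strangle_structure_spec : Claim_equal_validate_hedged_strangle_structure := by
  intro orders _
  unfold Spec_validate_hedged_strangle_structure
  exact pv_main orders
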